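-- pv_equiv track=rewrite | github.com/edwardkong/aoc | day22/solution.py | drop_bricks
-- ===== SOURCE A (Python) =====
-- def drop_bricks(bricks):
--     top_down = {}
--     supports = {}
--     for i, b in enumerate(bricks):
--         x1, y1, z1, x2, y2, z2 = b
--         b_max = 1
--         b_supports = set()
--         for x in range(x1, x2 + 1):
--             for y in range(y1, y2 + 1):
--                 coord_max, coord_brick = top_down.get((x, y), (0, None))
--                 if coord_max >= b_max:
--                     b_max = coord_max + 1
--                     b_supports = {coord_brick}
--                 elif coord_max == b_max - 1:
--                     if coord_brick is not None:
--                         b_supports.add(coord_brick)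
--         for x in range(x1, x2 + 1):
--             for y in range(y1, y2 + 1):
--                 top_down[(x, y)] = (b_max + z2 - z1, i)
--         supports[i] = b_supports
--     return supports
-- ===== SOURCE B (Python) =====
-- def drop_bricks(bricks):
--     # No heightmap: keep a flat log of placed bricks (id, footprint, resting top) and,
--     # per cell, find its current occupant by a geometric scan of the log (last hit wins).
--     placed = []  # (j, x1, y1, x2, y2, top), in fall order
--     supports = {}
--     for i, (x1, y1, z1, x2, y2, z2) in enumerate(bricks):
--         readings = []
--         for x in range(x1, x2 + 1):
--             for y in range(y1, y2 + 1):
--                 hit = (0, None)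
--                 for (j, a1, b1, a2, b2, t) in placed:
--                     if a1 <= x <= a2 and b1 <= y <= b2:
--                         hit = (t, j)  # later placements overwrite earlier ones
--                 readings.append(hit)
--         top = max([0] + [h for h, _ in readings])
--         supports[i] = {j for h, j in readings if h == top and j is not None}
--         placed.append((i, x1, y1, x2, y2, top + 1 + z2 - z1))
--     return supports
-- ===== Notes on version B (the rewrite author's own statement) =====
-- stated objective: alternative
-- what changed: B drops the (x,y)->(height,id) heightmap dict entirely: it keeps a flat log of placed bricks (id, footprint, resting top) and recomputes each footprint cell's occupant by a geometric last-hit scan of that log, then takes max-then-filter over the readings; it trades A's O(1) hash lookups for a brute-force rectangle-containment scan.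
import Mathlib
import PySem

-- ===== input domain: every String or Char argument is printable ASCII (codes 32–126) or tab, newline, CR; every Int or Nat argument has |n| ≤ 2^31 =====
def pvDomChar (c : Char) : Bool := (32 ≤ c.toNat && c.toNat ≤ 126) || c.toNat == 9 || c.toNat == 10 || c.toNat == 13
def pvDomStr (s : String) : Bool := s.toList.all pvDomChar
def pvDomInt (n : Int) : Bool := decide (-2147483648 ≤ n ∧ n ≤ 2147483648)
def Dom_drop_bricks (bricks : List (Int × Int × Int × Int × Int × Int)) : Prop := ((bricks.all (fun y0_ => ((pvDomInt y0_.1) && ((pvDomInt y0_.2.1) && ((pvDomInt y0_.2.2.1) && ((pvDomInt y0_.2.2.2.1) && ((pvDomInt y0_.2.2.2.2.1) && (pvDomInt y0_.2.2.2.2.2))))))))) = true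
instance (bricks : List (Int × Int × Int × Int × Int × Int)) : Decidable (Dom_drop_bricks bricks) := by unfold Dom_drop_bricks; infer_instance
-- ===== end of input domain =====

-- B replaces A's (x,y)->(height,id) heightmap dict by a flat log of already-placed bricks:
-- each footprint cell's occupant is recomputed by a geometric last-hit scan of the log,
-- and the supporters are found by max-then-filter over the readings; objective: alternative
-- (a different data structure; B is not faster).

-- ===== PORT A =====
-- top_down is only ever written and looked up by key (td.get / td[k] = v), never iterated,
-- so A's port carries it as Std.HashMap — exact for exactly those operations (Python's dict
-- insertion order is unobservable here); supports IS iterated at the end, so it is PySem.Dict.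
-- A's inner-loop branch on one footprint reading (coord_max, coord_brick), acting on the
-- running state (b_max, b_supports).  Python's reset branch builds {coord_brick}, which could
-- hold None only if a stored cell carried no brick id — top_down only ever stores (·, some i),
-- and the default (0, None) never satisfies coord_max >= b_max (b_max >= 1) — so the none case
-- of the reset branch is unreachable and is ported as the empty set.
def dbScanStep (acc : Int × PySem.Set Int) (r : Int × Option Int) : Int × PySem.Set Int :=
  if r.1 ≥ acc.1 then
    (r.1 + 1, match r.2 with | some c => PySem.Set.ofList [c] | none => PySem.Set.ofList [])
  else if r.1 = acc.1 - 1 then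
    (acc.1, match r.2 with | some c => PySem.Set.add acc.2 c | none => acc.2)
  else acc

-- the body of A's outer loop (one brick), as a named helper
def dbOuterA (st : Std.HashMap (Int × Int) (Int × Option Int) × PySem.Dict Int (PySem.Set Int))
    (ib : Int × (Int × Int × Int × Int × Int × Int)) :
    Std.HashMap (Int × Int) (Int × Option Int) × PySem.Dict Int (PySem.Set Int) :=
        let td := st.1
        let sp := st.2
        let i := ib.1
        match ib.2 with
        | (x1, y1, z1, x2, y2, z2) =>
          -- for x … for y …: running (b_max, b_supports) over the footprint readings
          let inner :=
            (PySem.List.pyRange x1 (x2 + 1) 1).foldl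
              (fun acc x =>
                (PySem.List.pyRange y1 (y2 + 1) 1).foldl
                  (fun acc2 y => dbScanStep acc2 (td.getD (x, y) ((0 : Int), (none : Option Int))))
                  acc)
              ((1 : Int), (PySem.Set.ofList [] : PySem.Set Int))
          -- second pass: top_down[(x, y)] = (b_max + z2 - z1, i)
          let td' :=
            (PySem.List.pyRange x1 (x2 + 1) 1).foldl
              (fun d x =>
                (PySem.List.pyRange y1 (y2 + 1) 1).foldl
                  (fun d2 y => d2.insert (x, y) (inner.1 + z2 - z1, some i))
                  d)
              td
          (td', sp.insert i inner.2)

def drop_bricks (bricks : List (Int × Int × Int × Int × Int × Int)) : List (Int × List Int) :=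
  ((PySem.List.enumerate bricks 0).foldl dbOuterA ((∅ : Std.HashMap (Int × Int) (Int × Option Int)), PySem.Dict.empty)).2.items

-- ===== PORT B =====
-- 'hit' for one cell: scan the placed log, last covering brick wins (default (0, None))
def dbHit (placed : List (Int × Int × Int × Int × Int × Int)) (x y : Int) : Int × Option Int :=
  placed.foldl
    (fun hit e =>
      match e with
      | (j, a1, b1, a2, b2, t) =>
        if a1 ≤ x ∧ x ≤ a2 ∧ b1 ≤ y ∧ y ≤ b2 then (t, some j) else hit)
    ((0 : Int), (none : Option Int))

-- the body of B's outer loop (one brick), as a named helper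
def dbOuterB (st : List (Int × Int × Int × Int × Int × Int) × PySem.Dict Int (PySem.Set Int))
    (ib : Int × (Int × Int × Int × Int × Int × Int)) :
    List (Int × Int × Int × Int × Int × Int) × PySem.Dict Int (PySem.Set Int) :=
        let placed := st.1
        let sp := st.2
        let i := ib.1
        match ib.2 with
        | (x1, y1, z1, x2, y2, z2) =>
          -- readings.append(hit) inside the nested x/y loops
          let readings :=
            (PySem.List.pyRange x1 (x2 + 1) 1).foldl
              (fun rs x =>
                (PySem.List.pyRange y1 (y2 + 1) 1).foldl
                  (fun rs2 y => rs2 ++ [dbHit placed x y])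
                  rs)
              ([] : List (Int × Option Int))
          -- max([0] + [h for h, _ in readings])
          let top := (readings.map (fun p => p.1)).foldl max 0
          -- {j for h, j in readings if h == top and j is not None}
          let supp : PySem.Set Int :=
            PySem.Set.ofList (readings.filterMap (fun p => if p.1 = top then p.2 else none))
          (placed ++ [(i, x1, y1, x2, y2, top + 1 + z2 - z1)], sp.insert i supp)

def drop_bricks_alt (bricks : List (Int × Int × Int × Int × Int × Int)) : List (Int × List Int) :=
  ((PySem.List.enumerate bricks 0).foldl dbOuterB (([] : List (Int × Int × Int × Int × Int × Int)), PySem.Dict.empty)).2.items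

-- ===== PRECONDITION & SPEC =====
def Spec_drop_bricks (bricks : List (Int × Int × Int × Int × Int × Int)) (out : List (Int × List Int)) : Prop := out = drop_bricks_alt bricks
instance (bricks : List (Int × Int × Int × Int × Int × Int)) (out : List (Int × List Int)) : Decidable (Spec_drop_bricks bricks out) := by unfold Spec_drop_bricks; infer_instance

-- ===== CLAIM (what is proved, stated in full; the proofs are below) =====
def Claim_equal_drop_bricks : Prop := ∀ (bricks : List (Int × Int × Int × Int × Int × Int)), Dom_drop_bricks bricks → Spec_drop_bricks bricks (drop_bricks bricks)

-- ===== LEMMAS AND PROOFS =====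

-- the simulation invariant: every cell of A's heightmap reads what B's log-scan computes
def dbInv (td : Std.HashMap (Int × Int) (Int × Option Int))
    (placed : List (Int × Int × Int × Int × Int × Int)) : Prop :=
  ∀ c : Int × Int, td.getD c ((0 : Int), (none : Option Int)) = dbHit placed c.1 c.2

-- the scan lemma: A's running-max-with-reset fold over the readings equals
-- (max height + 1, the set of ids whose reading attains the max)
lemma scan_eq (rs : List (Int × Option Int)) :
    rs.foldl dbScanStep (1, PySem.Set.ofList []) =
      ((rs.map (fun p => p.1)).foldl max 0 + 1,
       PySem.Set.ofList (rs.filterMap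
         (fun p => if p.1 = (rs.map (fun p => p.1)).foldl max 0 then p.2 else none))) := by
  induction rs using List.reverseRecOn with
  | nil => simp
  | append_singleton rs r ih =>
    have hle := (PySem.List.le_foldl_max (rs.map (fun p => p.1)) 0).2
    simp only [List.foldl_append, List.map_append, List.filterMap_append,
      List.foldl_cons, List.foldl_nil, List.map_cons, List.map_nil,
      List.filterMap_cons, List.filterMap_nil] at *
    rw [ih]
    set M := (rs.map (fun p => p.1)).foldl max 0 with hM
    rcases lt_trichotomy M r.1 with h1 | h1 | h1
    · -- reset branch: r.1 > M, so r.1 is the new maximum and no earlier reading attains it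
      have hmax : max M r.1 = r.1 := max_eq_right h1.le
      have hnil : rs.filterMap (fun p => if p.1 = max M r.1 then p.2 else none) = [] := by
        rw [List.filterMap_eq_nil_iff]
        intro p hp
        have := hle p.1 (List.mem_map_of_mem hp)
        rw [hmax, if_neg]; omega
      rw [hnil, hmax]
      rw [show dbScanStep (M + 1, PySem.Set.ofList (rs.filterMap fun p => if p.1 = M then p.2 else none)) r
            = (r.1 + 1, match r.2 with | some c => PySem.Set.ofList [c] | none => PySem.Set.ofList [])
          from by unfold dbScanStep; rw [if_pos (by omega)]]
      rw [if_pos rfl]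
      cases r.2 <;> simp
    · -- attain branch: r.1 = M, the reading's id joins the supporting set
      have hmax : max M r.1 = M := max_eq_left h1.ge
      rw [hmax]
      rw [show dbScanStep (M + 1, PySem.Set.ofList (rs.filterMap fun p => if p.1 = M then p.2 else none)) r
            = (M + 1, match r.2 with
                | some c => PySem.Set.add (PySem.Set.ofList (rs.filterMap fun p => if p.1 = M then p.2 else none)) c
                | none => PySem.Set.ofList (rs.filterMap fun p => if p.1 = M then p.2 else none))
          from by unfold dbScanStep; rw [if_neg (by omega), if_pos (by omega)]]
      rw [if_pos h1.symm]
      cases hr : r.2 with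
      | none => simp
      | some c => simp [PySem.Set.ofList_append_singleton]
    · -- below branch: r.1 < M, the reading changes nothing
      have hmax : max M r.1 = M := max_eq_left h1.le
      rw [hmax]
      rw [show dbScanStep (M + 1, PySem.Set.ofList (rs.filterMap fun p => if p.1 = M then p.2 else none)) r
            = (M + 1, PySem.Set.ofList (rs.filterMap fun p => if p.1 = M then p.2 else none))
          from by unfold dbScanStep; rw [if_neg (by omega), if_neg (by omega)]]
      rw [if_neg (by omega)]
      simp

-- writing v at every key of a list, then reading, is membership
lemma getD_foldl_insert (ks : List (Int × Int)) (v d0 : Int × Option Int)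
    (td : Std.HashMap (Int × Int) (Int × Option Int)) (c : Int × Int) :
    ((ks.foldl (fun d k => d.insert k v) td).getD c d0) =
      if c ∈ ks then v else td.getD c d0 := by
  induction ks generalizing td with
  | nil => simp
  | cons k ks ih =>
    simp only [List.foldl_cons, ih, List.mem_cons]
    by_cases hk : c ∈ ks
    · simp [hk]
    · rcases eq_or_ne k c with he | he
      · simp [hk, he]
      · simp [hk, he, Ne.symm he, Std.HashMap.getD_insert]

-- B's log extension, read back at one cell
lemma dbHit_append (placed : List (Int × Int × Int × Int × Int × Int))
    (i x1 y1 x2 y2 t x y : Int) :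
    dbHit (placed ++ [(i, x1, y1, x2, y2, t)]) x y =
      if x1 ≤ x ∧ x ≤ x2 ∧ y1 ≤ y ∧ y ≤ y2 then (t, some i) else dbHit placed x y := by
  simp only [dbHit, List.foldl_append, List.foldl_cons, List.foldl_nil]

-- one outer step: the invariant is preserved and the two supports entries agree
lemma outer_step (td : Std.HashMap (Int × Int) (Int × Option Int))
    (placed : List (Int × Int × Int × Int × Int × Int))
    (sp : PySem.Dict Int (PySem.Set Int))
    (ib : Int × (Int × Int × Int × Int × Int × Int))
    (hinv : dbInv td placed) :
    dbInv (dbOuterA (td, sp) ib).1 (dbOuterB (placed, sp) ib).1 ∧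
      (dbOuterA (td, sp) ib).2 = (dbOuterB (placed, sp) ib).2 := by
  obtain ⟨i, x1, y1, z1, x2, y2, z2⟩ := ib
  simp only [dbOuterA, dbOuterB]
  -- the footprint cells, as one flat list
  set cells :=
    (PySem.List.pyRange x1 (x2 + 1) 1).flatMap
      (fun x => (PySem.List.pyRange y1 (y2 + 1) 1).map (fun y => (x, y))) with hcells
  have hmemcells : ∀ c : Int × Int,
      c ∈ cells ↔ x1 ≤ c.1 ∧ c.1 ≤ x2 ∧ y1 ≤ c.2 ∧ c.2 ≤ y2 := by
    intro c
    simp only [hcells, List.mem_flatMap, List.mem_map, PySem.List.mem_pyRange_one]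
    constructor
    · rintro ⟨x, ⟨hx1, hx2⟩, y, ⟨hy1, hy2⟩, rfl⟩; exact ⟨hx1, by omega, hy1, by omega⟩
    · rintro ⟨h1, h2, h3, h4⟩; exact ⟨c.1, ⟨h1, by omega⟩, c.2, ⟨h3, by omega⟩, rfl⟩
  -- B's readings list is the map of dbHit over the cells
  have hreadings :
      (PySem.List.pyRange x1 (x2 + 1) 1).foldl
        (fun rs x =>
          (PySem.List.pyRange y1 (y2 + 1) 1).foldl
            (fun rs2 y => rs2 ++ [dbHit placed x y]) rs)
        ([] : List (Int × Option Int)) = cells.map (fun c => dbHit placed c.1 c.2) := by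
    rw [hcells, List.map_flatMap]
    rw [show (fun rs x =>
          (PySem.List.pyRange y1 (y2 + 1) 1).foldl
            (fun rs2 y => rs2 ++ [dbHit placed x y]) rs)
        = (fun rs x => rs ++ (PySem.List.pyRange y1 (y2 + 1) 1).map (fun y => dbHit placed x y))
      from funext fun rs => funext fun x => PySem.List.foldl_append_singleton_eq_map _ _ _]
    rw [PySem.List.foldl_append_eq_flatMap]
    simp [List.map_map, Function.comp_def]
  -- A's inner scan is the dbScanStep fold over the same readings (by the invariant)
  have hinner :
      (PySem.List.pyRange x1 (x2 + 1) 1).foldl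
        (fun acc x =>
          (PySem.List.pyRange y1 (y2 + 1) 1).foldl
            (fun acc2 y => dbScanStep acc2 (td.getD (x, y) ((0 : Int), (none : Option Int)))) acc)
        ((1 : Int), (PySem.Set.ofList [] : PySem.Set Int)) =
      (cells.map (fun c => dbHit placed c.1 c.2)).foldl dbScanStep
        ((1 : Int), (PySem.Set.ofList [] : PySem.Set Int)) := by
    rw [List.foldl_map, hcells, List.foldl_flatMap]
    simp only [List.foldl_map]
    congr 1
    funext acc x
    congr 1
    funext acc2 y
    rw [hinv (x, y)]
  rw [hinner, scan_eq, hreadings]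
  simp only [List.map_map, List.filterMap_map, Function.comp_def]
  refine ⟨?_, by trivial⟩
  -- the invariant after both write passes
  intro c
  have hwrite :
      (PySem.List.pyRange x1 (x2 + 1) 1).foldl
        (fun d x =>
          (PySem.List.pyRange y1 (y2 + 1) 1).foldl
            (fun d2 y => d2.insert (x, y)
              ((cells.map fun c => (dbHit placed c.1 c.2).1).foldl max 0 + 1 + z2 - z1, some i)) d)
        td =
      cells.foldl
        (fun d c => d.insert c
          ((cells.map fun c => (dbHit placed c.1 c.2).1).foldl max 0 + 1 + z2 - z1, some i))
        td := by
    rw [hcells, List.foldl_flatMap]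
    simp only [List.foldl_map]
  rw [hwrite, getD_foldl_insert, dbHit_append]
  by_cases h : x1 ≤ c.1 ∧ c.1 ≤ x2 ∧ y1 ≤ c.2 ∧ c.2 ≤ y2
  · rw [if_pos ((hmemcells c).mpr h), if_pos h]
  · rw [if_neg (fun hm => h ((hmemcells c).mp hm)), if_neg h]
    exact hinv c

-- folding the two outer bodies from related states yields equal supports dicts
lemma fold_eq (l : List (Int × (Int × Int × Int × Int × Int × Int)))
    (td : Std.HashMap (Int × Int) (Int × Option Int))
    (placed : List (Int × Int × Int × Int × Int × Int))
    (sp : PySem.Dict Int (PySem.Set Int)) (hinv : dbInv td placed) :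
    (l.foldl dbOuterA (td, sp)).2 = (l.foldl dbOuterB (placed, sp)).2 := by
  induction l generalizing td placed sp with
  | nil => rfl
  | cons ib l ih =>
    obtain ⟨hinv', hsp⟩ := outer_step td placed sp ib hinv
    simp only [List.foldl_cons]
    calc (l.foldl dbOuterA (dbOuterA (td, sp) ib)).2
        = (l.foldl dbOuterA ((dbOuterA (td, sp) ib).1, (dbOuterB (placed, sp) ib).2)).2 := by
          rw [← hsp]
      _ = (l.foldl dbOuterB ((dbOuterB (placed, sp) ib).1, (dbOuterB (placed, sp) ib).2)).2 :=
          ih _ _ _ hinv'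
      _ = (l.foldl dbOuterB (dbOuterB (placed, sp) ib)).2 := rfl

-- ===== VERDICT (by name: the statement is the Claim_ definition above) =====
theorem drop_bricks_spec : Claim_equal_drop_bricks := by
  intro bricks _
  unfold Spec_drop_bricks drop_bricks drop_bricks_alt
  rw [fold_eq]
  intro c
  simp [dbHit]
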